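-- pv_equiv track=rewrite | github.com/mppcoder/factory-template | template-repo/scripts/render-project-lifecycle-dashboard.py | module_readiness_chain_text
-- ===== SOURCE A (Python) =====
-- from typing import Any
--
-- CARD_WRAP_WIDTH = 74
--
-- MODULE_CARD_ORDER = ["lifecycle", "core", "security", "ui_a11y", "quality", "websec", "ops", "ai"]
--
-- STATUS_ICON = {
--     "passed": "✅",
--     "completed": "✅",
--     "done": "✅",
--     "ready": "✅",
--     "verified": "✅",
--     "executed": "✅",
--     "archived": "✅",
--     "in_progress": "🟡",
--     "codex_accepted": "🟡",
--     "implemented": "🟡",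
--     "open": "🟡",
--     "pending": "🕒",
--     "not_started": "🕒",
--     "draft": "🕒",
--     "blocked": "🔴",
--     "failed": "🔴",
--     "superseded": "⏸",
--     "not_applicable": "⏸",
-- }
--
-- def status_icon(status: str) -> str:
--     return STATUS_ICON.get((status or "").strip(), "🕒")
--
-- def chain_item(label: str, status: str) -> str:
--     return f"{status_icon(status)} {label}"
--
-- def wrap_chain(parts: list[str], width: int = CARD_WRAP_WIDTH) -> str:
--     if not parts:
--         return ""
--     lines: list[str] = []
--     current = parts[0]
--     for part in parts[1:]:
--         candidate = f"{current} → {part}"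
--         if len(candidate) <= width:
--             current = candidate
--         else:
--             lines.append(current)
--             current = f"→ {part}"
--     lines.append(current)
--     return "\n".join(lines)
--
-- def module_items(data: dict[str, Any]) -> list[dict[str, Any]]:
--     readiness = data.get("module_readiness", {}) if isinstance(data.get("module_readiness"), dict) else {}
--     modules = readiness.get("modules", [])
--     return [module for module in modules if isinstance(module, dict)] if isinstance(modules, list) else []
--
-- def module_readiness_chain_text(data: dict[str, Any]) -> str:
--     by_id = {str(module.get("id") or ""): module for module in module_items(data)}
--     parts: list[str] = []
--     for module_id in MODULE_CARD_ORDER: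
--         module = by_id.get(module_id, {})
--         label = str(module.get("label") or module_id)
--         status = str(module.get("status") or "pending")
--         parts.append(chain_item(label, status))
--     return wrap_chain(parts)
-- ===== SOURCE B (Python) =====
-- from typing import Any
--
-- CARD_WRAP_WIDTH = 74
--
-- MODULE_CARD_ORDER = ["lifecycle", "core", "security", "ui_a11y", "quality", "websec", "ops", "ai"]
--
-- STATUS_ICON = {
--     "passed": "✅",
--     "completed": "✅",
--     "done": "✅",
--     "ready": "✅",
--     "verified": "✅",
--     "executed": "✅",
--     "archived": "✅",
--     "in_progress": "🟡",
--     "codex_accepted": "🟡",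
--     "implemented": "🟡",
--     "open": "🟡",
--     "pending": "🕒",
--     "not_started": "🕒",
--     "draft": "🕒",
--     "blocked": "🔴",
--     "failed": "🔴",
--     "superseded": "⏸",
--     "not_applicable": "⏸",
-- }
--
--
-- def module_items(data: dict[str, Any]) -> list[dict[str, Any]]:
--     readiness = data.get("module_readiness", {}) if isinstance(data.get("module_readiness"), dict) else {}
--     modules = readiness.get("modules", [])
--     return [module for module in modules if isinstance(module, dict)] if isinstance(modules, list) else []
--
--
-- def _part(modules: list[dict[str, Any]], module_id: str) -> str:
--     module = next((m for m in modules if str(m.get("id") or "") == module_id), {})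
--     label = str(module.get("label") or module_id)
--     status = str(module.get("status") or "pending")
--     return f"{STATUS_ICON.get(status.strip(), '🕒')} {label}"
--
--
-- def _wrap(first: str, rest: list[str], width: int = CARD_WRAP_WIDTH) -> str:
--     if not rest:
--         return first
--     head, tail = rest[0], rest[1:]
--     candidate = f"{first} → {head}"
--     if len(candidate) <= width:
--         return _wrap(candidate, tail, width)
--     return f"{first}\n" + _wrap(f"→ {head}", tail, width)
--
--
-- def module_readiness_chain_text(data: dict[str, Any]) -> str:
--     modules = module_items(data)
--     parts = [_part(modules, module_id) for module_id in MODULE_CARD_ORDER]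
--     return _wrap(parts[0], parts[1:])
-- ===== Notes on version B (the rewrite author's own statement) =====
-- stated objective: alternative
-- what changed: B drops A's build-a-dict-index-then-lookup strategy and instead scans the module list for the first module matching each card id, builds the parts as a comprehension, and replaces the lines-accumulator wrap loop plus join with a recursive wrapper; Pre_ excludes data in which several module items share one card id, where A's dict-keeps-last choice and B's first-match choice are equally defensible and differ.
import Mathlib
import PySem

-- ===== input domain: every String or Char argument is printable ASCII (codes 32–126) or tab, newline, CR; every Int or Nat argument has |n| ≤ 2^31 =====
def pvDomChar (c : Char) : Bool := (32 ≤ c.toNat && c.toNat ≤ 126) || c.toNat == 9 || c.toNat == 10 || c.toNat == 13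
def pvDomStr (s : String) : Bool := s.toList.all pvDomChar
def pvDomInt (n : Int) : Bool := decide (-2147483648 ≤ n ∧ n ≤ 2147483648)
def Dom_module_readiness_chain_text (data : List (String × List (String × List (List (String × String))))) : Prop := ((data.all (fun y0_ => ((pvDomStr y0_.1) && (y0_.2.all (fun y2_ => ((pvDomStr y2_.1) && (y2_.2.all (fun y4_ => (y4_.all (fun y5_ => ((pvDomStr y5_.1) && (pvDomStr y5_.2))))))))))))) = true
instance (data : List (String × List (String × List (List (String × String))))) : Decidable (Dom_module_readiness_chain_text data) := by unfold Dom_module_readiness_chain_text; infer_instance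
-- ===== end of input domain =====

-- B replaces A's build-a-dict-index-then-look-up strategy by a first-match scan of the module
-- list per card id and the lines-accumulator wrap loop by a recursive wrapper; objective:
-- alternative (no speed claim); duplicate card ids are excluded by Pre_ (first vs last match).

-- ===== PORT A =====

def pvStatusTable : List (String × String) :=
  [("passed", "✅"), ("completed", "✅"), ("done", "✅"), ("ready", "✅"),
   ("verified", "✅"), ("executed", "✅"), ("archived", "✅"),
   ("in_progress", "🟡"), ("codex_accepted", "🟡"), ("implemented", "🟡"), ("open", "🟡"),
   ("pending", "🕒"), ("not_started", "🕒"), ("draft", "🕒"),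
   ("blocked", "🔴"), ("failed", "🔴"),
   ("superseded", "⏸"), ("not_applicable", "⏸")]

def pvModuleOrder : List String :=
  ["lifecycle", "core", "security", "ui_a11y", "quality", "websec", "ops", "ai"]

-- status_icon: '(status or "")' is the identity on str (falsy str is "" itself), so strip directly
def pvStatusIcon (status : String) : String :=
  (PySem.Dict.mk pvStatusTable).getD (PySem.Str.strip status) "🕒"

def pvChainItem (label : String) (status : String) : String :=
  pvStatusIcon status ++ " " ++ label

def pvWrapChain (parts : List String) (width : Int) : String :=
  match parts with
  | [] => ""
  | p :: rest =>
    let st := rest.foldl (fun (st : List String × String) part =>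
        let candidate := st.2 ++ " → " ++ part
        if PySem.Str.len candidate ≤ width then (st.1, candidate)
        else (st.1 ++ [st.2], "→ " ++ part)) (([] : List String), p)
    PySem.Str.join "\n" (st.1 ++ [st.2])

-- module_items: at this type data.get("module_readiness") is always a dict and "modules" always
-- a list of dicts, so the isinstance guards are true and the filter is the identity
def pvModuleItems (data : List (String × List (String × List (List (String × String))))) :
    List (List (String × String)) :=
  let readiness := (PySem.Dict.mk data).getD "module_readiness" []
  (PySem.Dict.mk readiness).getD "modules" []

-- str(module.get("id") or ""): None and "" both collapse to "", so getD with default ""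
def pvIdKey (m : List (String × String)) : String := (PySem.Dict.mk m).getD "id" ""

def module_readiness_chain_text (data : List (String × List (String × List (List (String × String))))) : String :=
  let byId := (pvModuleItems data).foldl (fun d m => d.insert (pvIdKey m) m)
      (PySem.Dict.empty : PySem.Dict String (List (String × String)))
  let parts := pvModuleOrder.foldl (fun (ps : List String) module_id =>
      let module := byId.getD module_id []
      -- str(module.get("label") or module_id): None and "" both fall back to module_id
      let label := let l := (PySem.Dict.mk module).getD "label" ""
                   if l = "" then module_id else l
      let status := let s := (PySem.Dict.mk module).getD "status" ""
                    if s = "" then "pending" else s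
      ps ++ [pvChainItem label status]) []
  pvWrapChain parts 74

-- ===== PORT B =====

-- next((m for m in modules if str(m.get("id") or "") == module_id), {})
def pvPick (modules : List (List (String × String))) (module_id : String) :
    List (String × String) :=
  (modules.find? (fun m => pvIdKey m == module_id)).getD []

def pvPart (modules : List (List (String × String))) (module_id : String) : String :=
  let module := pvPick modules module_id
  let label := let l := (PySem.Dict.mk module).getD "label" ""
               if l = "" then module_id else l
  let status := let s := (PySem.Dict.mk module).getD "status" ""
                if s = "" then "pending" else s
  (PySem.Dict.mk pvStatusTable).getD (PySem.Str.strip status) "🕒" ++ " " ++ label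

def pvWrapRec (first : String) (rest : List String) (width : Int) : String :=
  match rest with
  | [] => first
  | head :: tail =>
    let candidate := first ++ " → " ++ head
    if PySem.Str.len candidate ≤ width then pvWrapRec candidate tail width
    else first ++ "\n" ++ pvWrapRec ("→ " ++ head) tail width

def module_readiness_chain_text_alt (data : List (String × List (String × List (List (String × String))))) : String :=
  let modules := pvModuleItems data
  let parts := pvModuleOrder.map (pvPart modules)
  -- parts[0] / parts[1:]: MODULE_CARD_ORDER is a nonempty literal so parts is nonempty
  pvWrapRec (parts.headD "") (parts.drop 1) 74

-- ===== PRECONDITION & SPEC =====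
-- Pre_ excludes data in which several module items carry the same card id: there A's dict keeps
-- the LAST matching module while B's scan takes the FIRST, and either choice is defensible on
-- such accidental duplicates.
def Pre_module_readiness_chain_text (data : List (String × List (String × List (List (String × String))))) : Prop :=
  ∀ k ∈ pvModuleOrder, (pvModuleItems data).countP (fun m => pvIdKey m == k) ≤ 1
instance (data : List (String × List (String × List (List (String × String))))) : Decidable (Pre_module_readiness_chain_text data) := by unfold Pre_module_readiness_chain_text; infer_instance

def pvWitness_module_readiness_chain_text : (List (String × List (String × List (List (String × String))))) :=
  [("module_readiness", [("modules", [[("id", "core"), ("label", "Core"), ("status", "done")]])])]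

def Spec_module_readiness_chain_text (data : List (String × List (String × List (List (String × String))))) (out : String) : Prop := out = module_readiness_chain_text_alt data
instance (data : List (String × List (String × List (List (String × String))))) (out : String) : Decidable (Spec_module_readiness_chain_text data out) := by unfold Spec_module_readiness_chain_text; infer_instance

-- ===== CLAIM (what is proved, stated in full; the proofs are below) =====
def Claim_equal_module_readiness_chain_text : Prop := ∀ (data : List (String × List (String × List (List (String × String))))), Dom_module_readiness_chain_text data → Pre_module_readiness_chain_text data → Spec_module_readiness_chain_text data (module_readiness_chain_text data)

-- ===== LEMMAS AND PROOFS =====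

-- the dict index built by insertion, looked up at k, is the last matching module (or [])
theorem pv_getD_foldl_insert (ms : List (List (String × String)))
    (d : PySem.Dict String (List (String × String))) (k : String) :
    (ms.foldl (fun d m => d.insert (pvIdKey m) m) d).getD k [] =
      ms.foldl (fun chosen m => if pvIdKey m = k then m else chosen) (d.getD k []) := by
  induction ms generalizing d with
  | nil => rfl
  | cons m ms ih =>
    simp only [List.foldl_cons, ih, PySem.Dict.getD_insert]
    by_cases h : pvIdKey m = k
    · simp [h]
    · have h' : k ≠ pvIdKey m := fun hk => h hk.symm
      simp [h, h']

-- a last-match fold over a list with no match keeps its accumulator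
theorem pv_foldl_no_match (ms : List (List (String × String))) (k : String)
    (init : List (String × String)) (h : ms.countP (fun m => pvIdKey m == k) = 0) :
    ms.foldl (fun chosen m => if pvIdKey m = k then m else chosen) init = init := by
  induction ms generalizing init with
  | nil => rfl
  | cons m ms ih =>
    rw [List.countP_cons] at h
    by_cases hm : pvIdKey m = k
    · simp [hm] at h
    · simp only [List.foldl_cons, if_neg hm]
      exact ih init (by simpa [hm] using h)

-- with at most one match, the last-match fold is the first match
theorem pv_fold_eq_find (ms : List (List (String × String))) (k : String)
    (h : ms.countP (fun m => pvIdKey m == k) ≤ 1) :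
    ms.foldl (fun chosen m => if pvIdKey m = k then m else chosen) [] =
      (ms.find? (fun m => pvIdKey m == k)).getD [] := by
  induction ms with
  | nil => rfl
  | cons m ms ih =>
    rw [List.countP_cons] at h
    by_cases hm : pvIdKey m = k
    · have h0 : ms.countP (fun m => pvIdKey m == k) = 0 := by
        simp only [hm, beq_self_eq_true, if_pos] at h
        omega
      rw [List.foldl_cons, if_pos hm, List.find?_cons_of_pos (by simp [hm]),
        Option.getD_some]
      exact pv_foldl_no_match ms k m h0
    · rw [List.foldl_cons, if_neg hm, List.find?_cons_of_neg (by simp [hm])]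
      exact ih (by simpa [hm] using h)

theorem pv_join_cons_ne (sep c : List Char) (l : List (List Char)) (h : l ≠ []) :
    PySem.Chars.join sep (c :: l) = c ++ sep ++ PySem.Chars.join sep l := by
  cases l with
  | nil => exact absurd rfl h
  | cons y t => exact PySem.Chars.join_cons_cons sep c y t

theorem pv_chars_join_split (sep : List Char) (xs : List (List Char)) (a b : List Char) :
    PySem.Chars.join sep (xs ++ [a ++ sep ++ b]) = PySem.Chars.join sep (xs ++ [a, b]) := by
  induction xs with
  | nil =>
    simp only [List.nil_append, PySem.Chars.join_singleton, PySem.Chars.join_cons_cons,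
      PySem.Chars.join_singleton]
  | cons c xs ih =>
    rw [List.cons_append, pv_join_cons_ne sep c _ (by simp), List.cons_append,
      pv_join_cons_ne sep c _ (by simp), ih]

theorem pv_join_split (ls : List String) (a b : String) :
    PySem.Str.join "\n" (ls ++ [a ++ "\n" ++ b]) = PySem.Str.join "\n" (ls ++ [a, b]) := by
  rw [← String.toList_inj]
  simp only [PySem.Str.toList_join, List.map_append, List.map_cons, List.map_nil,
    String.toList_append]
  exact pv_chars_join_split _ _ _ _

theorem pv_join_singleton (x : String) : PySem.Str.join "\n" [x] = x := by
  rw [← String.toList_inj, PySem.Str.toList_join]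
  simp [PySem.Chars.join_singleton]

-- the lines-accumulator wrap loop equals the recursive wrapper, under any prefix of lines
theorem pv_wrap_fold (width : Int) (rest : List String) (ls : List String) (cur : String) :
    PySem.Str.join "\n"
      ((rest.foldl (fun (st : List String × String) part =>
          let candidate := st.2 ++ " → " ++ part
          if PySem.Str.len candidate ≤ width then (st.1, candidate)
          else (st.1 ++ [st.2], "→ " ++ part)) (ls, cur)).1 ++
        [(rest.foldl (fun (st : List String × String) part =>
          let candidate := st.2 ++ " → " ++ part
          if PySem.Str.len candidate ≤ width then (st.1, candidate)
          else (st.1 ++ [st.2], "→ " ++ part)) (ls, cur)).2]) =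
    PySem.Str.join "\n" (ls ++ [pvWrapRec cur rest width]) := by
  induction rest generalizing ls cur with
  | nil => simp [pvWrapRec]
  | cons h t ih =>
    simp only [List.foldl_cons, pvWrapRec]
    by_cases hlen : PySem.Str.len (cur ++ " → " ++ h) ≤ width
    · simp only [hlen, if_pos, ih]
    · simp only [hlen, if_neg, not_false_iff, ih]
      rw [pv_join_split, List.append_assoc]
      rfl

theorem pv_wrap_eq (parts : List String) (p : String) (width : Int) :
    pvWrapChain (p :: parts) width = pvWrapRec p parts width := by
  show PySem.Str.join "\n" _ = _
  rw [pv_wrap_fold width parts [] p, List.nil_append, pv_join_singleton]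

-- ===== VERDICT (by name: the statement is the Claim_ definition above) =====
theorem module_readiness_chain_text_spec : Claim_equal_module_readiness_chain_text := by
  intro data _ hpre
  unfold Spec_module_readiness_chain_text module_readiness_chain_text module_readiness_chain_text_alt
  simp only [PySem.List.foldl_append_singleton_eq_map, List.nil_append]
  have hparts : (pvModuleOrder.map (fun module_id =>
      pvChainItem
        (let l := (PySem.Dict.mk (((pvModuleItems data).foldl (fun d m => d.insert (pvIdKey m) m)
            (PySem.Dict.empty : PySem.Dict String (List (String × String)))).getD module_id [])).getD "label" ""
         if l = "" then module_id else l)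
        (let s := (PySem.Dict.mk (((pvModuleItems data).foldl (fun d m => d.insert (pvIdKey m) m)
            (PySem.Dict.empty : PySem.Dict String (List (String × String)))).getD module_id [])).getD "status" ""
         if s = "" then "pending" else s))) =
      pvModuleOrder.map (pvPart (pvModuleItems data)) := by
    apply List.map_congr_left
    intro mid hmid
    have hlk : (((pvModuleItems data).foldl (fun d m => d.insert (pvIdKey m) m)
        (PySem.Dict.empty : PySem.Dict String (List (String × String)))).getD mid []) =
        pvPick (pvModuleItems data) mid := by
      rw [pv_getD_foldl_insert, PySem.Dict.getD_empty]
      exact pv_fold_eq_find _ mid (hpre mid hmid)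
    rw [hlk]
    rfl
  rw [hparts]
  cases hmo : pvModuleOrder.map (pvPart (pvModuleItems data)) with
  | nil => simp [pvModuleOrder] at hmo
  | cons p rest =>
    simp only [List.headD_cons, List.drop_succ_cons, List.drop_zero]
    exact pv_wrap_eq rest p 74
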